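-- pv_equiv track=rewrite | github.com/evanse71/OWLIN-App | backend/services/matching_config.py | normalize_uom
-- ===== SOURCE A (Python) =====
-- from typing import Dict, Any
--
-- def get_uom_map() -> Dict[str, list]:
--     """Get unit of measure mapping for normalization."""
--     return {
--         'kg': ['kg', 'kilo', 'kilogram'],
--         'l': ['l', 'litre', 'liter'],
--         'each': ['ea', 'unit', 'pcs', 'piece'],
--         'case': ['case', 'cs'],
--         'box': ['box', 'bx'],
--         'pack': ['pack', 'pk'],
--         'bottle': ['bottle', 'btl'],
--         'can': ['can', 'tin'],
--         'bag': ['bag', 'sack']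
--     }
--
-- def normalize_uom(uom: str) -> str:
--     """Normalize unit of measure to canonical form."""
--     if not uom:
--         return 'each'
--
--     uom_lower = uom.lower().strip()
--     uom_map = get_uom_map()
--
--     for canonical, variants in uom_map.items():
--         if uom_lower in variants or uom_lower == canonical:
--             return canonical
--
--     return uom_lower
-- ===== SOURCE B (Python) =====
-- from typing import Dict, Any
--
-- def get_uom_map() -> Dict[str, list]:
--     """Get unit of measure mapping for normalization."""
--     return {
--         'kg': ['kg', 'kilo', 'kilogram'],
--         'l': ['l', 'litre', 'liter'],
--         'each': ['ea', 'unit', 'pcs', 'piece'],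
--         'case': ['case', 'cs'],
--         'box': ['box', 'bx'],
--         'pack': ['pack', 'pk'],
--         'bottle': ['bottle', 'btl'],
--         'can': ['can', 'tin'],
--         'bag': ['bag', 'sack']
--     }
--
-- def _build_reverse_table() -> Dict[str, str]:
--     table = {}
--     for canonical, variants in get_uom_map().items():
--         for v in variants:
--             table[v] = canonical
--         table[canonical] = canonical
--     return table
--
-- _UOM_TABLE = _build_reverse_table()
--
-- def normalize_uom(uom: str) -> str:
--     """Normalize unit of measure to canonical form."""
--     if not uom:
--         return 'each'
--     uom_lower = uom.lower().strip()
--     return _UOM_TABLE.get(uom_lower, uom_lower)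
-- ===== Notes on version B (the rewrite author's own statement) =====
-- stated objective: idiomatic
-- what changed: B precomputes once a reverse variant->canonical dictionary (including canonical->itself) and answers each call with a single dict.get lookup, eliminating A's per-call loop over the map with list-membership tests.
import Mathlib
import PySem

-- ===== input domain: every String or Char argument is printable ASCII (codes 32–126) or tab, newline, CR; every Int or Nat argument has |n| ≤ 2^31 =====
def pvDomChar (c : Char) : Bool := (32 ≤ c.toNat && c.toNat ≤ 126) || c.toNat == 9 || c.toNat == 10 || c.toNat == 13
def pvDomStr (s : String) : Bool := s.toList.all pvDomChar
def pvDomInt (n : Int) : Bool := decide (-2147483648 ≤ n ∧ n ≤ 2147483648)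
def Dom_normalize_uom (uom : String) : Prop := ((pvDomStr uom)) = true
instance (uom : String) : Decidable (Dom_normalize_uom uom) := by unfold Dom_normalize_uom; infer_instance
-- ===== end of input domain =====

-- B replaces A's per-call scan of the UOM map by a prebuilt reverse lookup dictionary (idiomatic; return value only).


-- ===== PORT A =====
-- get_uom_map() as an association list in insertion order
def uomMap : List (String × List String) :=
  [("kg", ["kg", "kilo", "kilogram"]),
   ("l", ["l", "litre", "liter"]),
   ("each", ["ea", "unit", "pcs", "piece"]),
   ("case", ["case", "cs"]),
   ("box", ["box", "bx"]),
   ("pack", ["pack", "pk"]),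
   ("bottle", ["bottle", "btl"]),
   ("can", ["can", "tin"]),
   ("bag", ["bag", "sack"])]

-- A's for-loop over the map items: first group matched by membership-or-key wins
def normalizeLoop (u : String) : List (String × List String) → String
  | [] => u
  | (c, vs) :: rest => if u ∈ vs ∨ u = c then c else normalizeLoop u rest

def normalize_uom (uom : String) : String :=
  if uom = "" then "each"
  else normalizeLoop (PySem.Str.strip (PySem.Str.lower uom)) uomMap

-- ===== PORT B =====
-- B's one-time reverse table: every variant (and each canonical key itself) mapped to its canonical form
def uomTable : PySem.Dict String String :=
  uomMap.foldl
    (fun t p => ((p.2.foldl (fun t v => t.insert v p.1) t).insert p.1 p.1))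
    PySem.Dict.empty

def normalize_uom_alt (uom : String) : String :=
  if uom = "" then "each"
  else
    let u := PySem.Str.strip (PySem.Str.lower uom)
    uomTable.getD u u

-- ===== PRECONDITION & SPEC =====
def Spec_normalize_uom (uom : String) (out : String) : Prop := out = normalize_uom_alt uom
instance (uom : String) (out : String) : Decidable (Spec_normalize_uom uom out) := by unfold Spec_normalize_uom; infer_instance

-- ===== CLAIM (what is proved, stated in full; the proofs are below) =====
def Claim_equal_normalize_uom : Prop := ∀ (uom : String), Dom_normalize_uom uom → Spec_normalize_uom uom (normalize_uom uom)

-- ===== LEMMAS AND PROOFS =====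

-- all strings the two programs treat specially (keys of the reverse table)
def uomKeys : List String :=
  ["kg", "kilo", "kilogram", "l", "litre", "liter", "ea", "unit", "pcs", "piece",
   "each", "case", "cs", "box", "bx", "pack", "pk", "bottle", "btl", "can", "tin",
   "bag", "sack"]

lemma core_eq (u : String) : normalizeLoop u uomMap = uomTable.getD u u := by
  by_cases hm : u ∈ uomKeys
  · fin_cases hm <;> rfl
  · simp only [uomKeys, List.mem_cons, List.not_mem_nil, or_false, not_or] at hm
    obtain ⟨h1, h2, h3, h4, h5, h6, h7, h8, h9, h10, h11, h12, h13, h14, h15, h16,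
      h17, h18, h19, h20, h21, h22, h23⟩ := hm
    simp [normalizeLoop, uomMap, uomTable, PySem.Dict.getD_insert,
      h1, h2, h3, h4, h5, h6, h7, h8, h9, h10, h11, h12, h13, h14, h15, h16,
      h17, h18, h19, h20, h21, h22, h23]

-- ===== VERDICT (by name: the statement is the Claim_ definition above) =====
theorem normalize_uom_spec : Claim_equal_normalize_uom := by
  intro uom _
  unfold Spec_normalize_uom normalize_uom normalize_uom_alt
  by_cases h : uom = "" <;> simp [h, core_eq]
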